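-- pv_equiv track=rewrite | github.com/matojaotam/zkouska | cells_analysis.py | calculate_growth_rate
-- ===== SOURCE A (Python) =====
-- def calculate_growth_rate(values):
--     differences = []
--
--     for i in range(len(values) - 1):
--         diff = values[i+1] - values[i]
--         differences.append(diff)
--
--     first = differences[0]
--
--     for d in differences:
--         if d != first:
--             return None
--
--     return first
-- ===== SOURCE B (Python) =====
-- def calculate_growth_rate(values):
--     first = values[1] - values[0]
--     prev = values[1]
--     for v in values[2:]:
--         if v - prev != first:
--             return None
--         prev = v
--     return first
-- ===== Notes on version B (the rewrite author's own statement) =====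
-- stated objective: simpler
-- what changed: B drops A's intermediate differences list and its second full scan: it fixes first = values[1]-values[0] and walks the remaining values once, comparing each consecutive difference on the fly with O(1) extra space.
import Mathlib
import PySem

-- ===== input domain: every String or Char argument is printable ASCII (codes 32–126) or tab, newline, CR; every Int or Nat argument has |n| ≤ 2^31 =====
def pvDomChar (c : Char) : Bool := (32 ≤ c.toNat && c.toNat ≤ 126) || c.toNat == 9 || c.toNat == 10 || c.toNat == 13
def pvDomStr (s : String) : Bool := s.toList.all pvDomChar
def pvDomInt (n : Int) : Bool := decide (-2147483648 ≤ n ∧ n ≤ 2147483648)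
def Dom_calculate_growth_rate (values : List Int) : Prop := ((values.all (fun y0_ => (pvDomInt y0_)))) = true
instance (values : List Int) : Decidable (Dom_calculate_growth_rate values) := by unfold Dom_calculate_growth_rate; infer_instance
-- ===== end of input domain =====

-- B replaces A's intermediate differences list and second scan by one direct pass with O(1) extra state (objective: simpler).


-- ===== PORT A =====
-- 'for d in differences: if d != first: return None / return first' as structural recursion
def pvCheckA (first : Int) : List Int → Option Int
  | [] => some first
  | d :: t => if d ≠ first then none else pvCheckA first t

def calculate_growth_rate (values : List Int) : Option Int :=
  let differences :=
    (PySem.List.pyRange 0 (PySem.List.len values - 1) 1).foldl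
      (fun acc i => acc ++ [PySem.List.pyGetD values (i + 1) 0 - PySem.List.pyGetD values i 0]) []
  match PySem.List.pyGet? differences 0 with
  | none => none        -- differences[0] raises IndexError (len(values) ≤ 1): outside Pre_
  | some first => pvCheckA first differences

-- ===== PORT B =====
-- the 'for v in values[2:]' loop of Source B, carrying prev
def pvGoB (first prev : Int) : List Int → Option Int
  | [] => some first
  | v :: t => if v - prev ≠ first then none else pvGoB first v t

def calculate_growth_rate_alt (values : List Int) : Option Int :=
  match PySem.List.pyGet? values 1, PySem.List.pyGet? values 0 with
  | some v1, some v0 =>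
      pvGoB (v1 - v0) v1 (PySem.List.slice values (some 2) none)
  | _, _ => none        -- values[1] raises IndexError (len(values) ≤ 1): outside Pre_
  -- note: 'values[1] - values[0]' and 'prev = values[1]' evaluate before the loop; both indexings
  -- are in range exactly when len(values) ≥ 2, so this match is the faithful total form.

-- ===== PRECONDITION & SPEC =====
-- A raises IndexError (differences[0]) exactly when len(values) ≤ 1.
def Pre_calculate_growth_rate (values : List Int) : Prop := 2 ≤ values.length
instance (values : List Int) : Decidable (Pre_calculate_growth_rate values) := by
  unfold Pre_calculate_growth_rate; infer_instance

def pvWitness_calculate_growth_rate : List Int := [3, 5, 7]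

def Spec_calculate_growth_rate (values : List Int) (out : Option Int) : Prop := out = calculate_growth_rate_alt values
instance (values : List Int) (out : Option Int) : Decidable (Spec_calculate_growth_rate values out) := by unfold Spec_calculate_growth_rate; infer_instance

-- ===== CLAIM (what is proved, stated in full; the proofs are below) =====
def Claim_equal_calculate_growth_rate : Prop := ∀ (values : List Int), Dom_calculate_growth_rate values → Pre_calculate_growth_rate values → Spec_calculate_growth_rate values (calculate_growth_rate values)

-- ===== LEMMAS AND PROOFS =====

-- the list of consecutive differences, by structural recursion
def pvDiffs : List Int → List Int
  | a :: b :: t => (b - a) :: pvDiffs (b :: t)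
  | _ => []

lemma pvDiffs_eq (v : List Int) :
    (List.range (v.length - 1)).map (fun k => v.getD (k + 1) 0 - v.getD k 0) = pvDiffs v := by
  match v with
  | [] => simp [pvDiffs]
  | [a] => simp [pvDiffs]
  | a :: b :: t =>
    have ih := pvDiffs_eq (b :: t)
    simp only [List.length_cons, Nat.add_sub_cancel] at ih ⊢
    rw [List.range_succ_eq_map, List.map_cons, List.map_map]
    simp only [pvDiffs]
    congr 1

lemma pvCheck_goB (first : Int) : ∀ (prev : Int) (rest : List Int),
    pvCheckA first (pvDiffs (prev :: rest)) = pvGoB first prev rest := by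
  intro prev rest
  induction rest generalizing prev with
  | nil => simp [pvDiffs, pvCheckA, pvGoB]
  | cons v t ih =>
    simp only [pvDiffs, pvCheckA, pvGoB]
    split_ifs with h
    · rfl
    · exact ih v

-- ===== VERDICT (by name: the statement is the Claim_ definition above) =====
theorem calculate_growth_rate_spec : Claim_equal_calculate_growth_rate := by
  intro values _ hpre
  unfold Pre_calculate_growth_rate at hpre
  match values, hpre with
  | v0 :: v1 :: rest, _ =>
    unfold Spec_calculate_growth_rate calculate_growth_rate calculate_growth_rate_alt
    have hfold :
        (PySem.List.pyRange 0 (PySem.List.len (v0 :: v1 :: rest) - 1) 1).foldl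
          (fun acc i => acc ++ [PySem.List.pyGetD (v0 :: v1 :: rest) (i + 1) 0
                                - PySem.List.pyGetD (v0 :: v1 :: rest) i 0]) []
          = pvDiffs (v0 :: v1 :: rest) := by
      rw [PySem.List.foldl_append_singleton_eq_map, PySem.List.pyRange_one]
      rw [← pvDiffs_eq (v0 :: v1 :: rest)]
      simp only [List.map_map, PySem.List.len_eq, List.length_cons, List.nil_append,
        Nat.add_sub_cancel]
      have hn : ((rest.length + 1 + 1 : Nat) : Int) - 1 - 0 = ((rest.length + 1 : Nat) : Int) := by
        push_cast; ring
      rw [hn, Int.toNat_natCast]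
      apply List.map_congr_left
      intro k _
      simp only [Function.comp_apply, zero_add]
      have h1 : (k : Int) + 1 = ((k + 1 : Nat) : Int) := by push_cast; ring
      rw [h1, PySem.List.pyGetD_natCast, PySem.List.pyGetD_natCast]
    simp only [hfold]
    have hslice : PySem.List.slice (v0 :: v1 :: rest) (some 2) none = rest := by
      rw [PySem.List.slice_from (v0 :: v1 :: rest) (a := 2) (by norm_num)]
      rfl
    simp only [show (1 : Int) = ((1 : Nat) : Int) from by norm_num,
      PySem.List.pyGet?_natCast, pvDiffs, PySem.List.pyGet?_zero_cons, hslice,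
      List.getElem?_cons_succ, List.getElem?_cons_zero]
    show pvCheckA (v1 - v0) ((v1 - v0) :: pvDiffs (v1 :: rest)) = pvGoB (v1 - v0) v1 rest
    rw [pvCheckA]
    simp only [ne_eq, not_true_eq_false, if_false]
    exact pvCheck_goB (v1 - v0) v1 rest
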